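-- pv_equiv track=rewrite | github.com/Phucptit2003/Python-PTIT | 28-7-1.py | count_different_strings
-- ===== SOURCE A (Python) =====
-- def count_different_strings(n, m, s, operations):
--     unique_strings = set()
--     substrings = [0] * (n + 1)
--     for i in range(m):
--         l, r = operations[i]
--         substrings[l - 1] += 1
--         substrings[r] -= 1
--
--     current_count = 0
--     for i in range(n):
--         current_count += substrings[i]
--         if current_count > 0:
--             substring = sorted(s[i - current_count:i])
--             modified_string = s[:i - current_count] + ''.join(substring) + s[i:]
--             unique_strings.add(modified_string)
--
--     return len(unique_strings)
-- ===== SOURCE B (Python) =====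
-- def count_different_strings(n, m, s, operations):
--     # direct per-index coverage count instead of difference array + running prefix sum
--     def coverage(i):
--         return sum(1 for k in range(m)
--                    if operations[k][0] - 1 <= i < operations[k][1])
--     variants = {s[:i - c] + ''.join(sorted(s[i - c:i])) + s[i:]
--                 for i in range(n)
--                 for c in (coverage(i),)
--                 if c > 0}
--     return len(variants)
-- ===== Notes on version B (the rewrite author's own statement) =====
-- stated objective: alternative
-- what changed: Replaces the difference-array-plus-running-prefix-sum computation of per-index coverage by a direct per-index count over the operations, and builds the set of modified strings with a set comprehension instead of an imperative loop with accumulator state.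
-- outside the precondition, e.g. on count_different_strings(3, 1, 'abc', [(0, 2)]): A returns 0, B returns 2
import Mathlib
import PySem

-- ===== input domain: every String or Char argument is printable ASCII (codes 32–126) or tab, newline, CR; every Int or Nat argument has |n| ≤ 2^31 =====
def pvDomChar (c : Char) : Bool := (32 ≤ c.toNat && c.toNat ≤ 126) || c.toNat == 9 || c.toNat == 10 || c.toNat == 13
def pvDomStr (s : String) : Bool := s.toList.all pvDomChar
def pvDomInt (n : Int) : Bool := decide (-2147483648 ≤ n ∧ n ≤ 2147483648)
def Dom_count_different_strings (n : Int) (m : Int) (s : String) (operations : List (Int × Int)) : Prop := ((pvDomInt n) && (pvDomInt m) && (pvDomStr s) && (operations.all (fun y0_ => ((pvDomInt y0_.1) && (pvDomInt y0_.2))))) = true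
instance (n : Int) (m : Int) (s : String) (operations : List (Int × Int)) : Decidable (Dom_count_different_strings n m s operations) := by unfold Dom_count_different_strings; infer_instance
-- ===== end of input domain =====

-- B computes each index's coverage by a direct count over the operations instead of A's
-- difference array + running prefix sum, and builds the set of variants by a comprehension
-- (objective: alternative; equal where all first m operations are valid 1-based ranges).

-- ===== PORT A =====
-- body of A's first loop: substrings[l-1] += 1; substrings[r] -= 1
def aStep (operations : List (Int × Int)) (subs : List Int) (i : Int) : List Int :=
  let op := PySem.List.pyGetD operations i (0, 0)
  let subs1 := PySem.List.pySetD subs (op.1 - 1) (PySem.List.pyGetD subs (op.1 - 1) 0 + 1)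
  PySem.List.pySetD subs1 op.2 (PySem.List.pyGetD subs1 op.2 0 - 1)

-- body of A's second loop: accumulate current_count, maybe add the modified string
def aMainStep (substrings : List Int) (cs : List Char)
    (st : Int × PySem.Set (List Char)) (i : Int) : Int × PySem.Set (List Char) :=
  let cc := st.1 + PySem.List.pyGetD substrings i 0
  if cc > 0 then
    let substring := PySem.List.sorted (PySem.List.slice cs (some (i - cc)) (some i)) (fun c => c) false
    let modified := PySem.List.slice cs none (some (i - cc)) ++ substring ++ PySem.List.slice cs (some i) none
    (cc, PySem.Set.add st.2 modified)
  else (cc, st.2)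

def count_different_strings (n : Int) (m : Int) (s : String) (operations : List (Int × Int)) : Int :=
  let substrings := (PySem.List.pyRange 0 m 1).foldl (aStep operations) (List.replicate (n + 1).toNat 0)
  let final := (PySem.List.pyRange 0 n 1).foldl (aMainStep substrings s.toList) (0, PySem.Set.empty)
  PySem.Set.len final.2

-- ===== PORT B =====
-- coverage(i) = sum(1 for k in range(m) if operations[k][0] - 1 <= i < operations[k][1])
def altCoverage (m : Int) (operations : List (Int × Int)) (i : Int) : Int :=
  ((PySem.List.pyRange 0 m 1).countP (fun k =>
      let op := PySem.List.pyGetD operations k (0, 0)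
      decide (op.1 - 1 ≤ i ∧ i < op.2)) : Int)

-- s[:i-c] + ''.join(sorted(s[i-c:i])) + s[i:]
def altVariant (cs : List Char) (i : Int) (c : Int) : List Char :=
  PySem.List.slice cs none (some (i - c)) ++
  PySem.List.sorted (PySem.List.slice cs (some (i - c)) (some i)) (fun ch => ch) false ++
  PySem.List.slice cs (some i) none

def count_different_strings_alt (n : Int) (m : Int) (s : String) (operations : List (Int × Int)) : Int :=
  let cs := s.toList
  PySem.Set.len (PySem.Set.ofList ((PySem.List.pyRange 0 n 1).filterMap (fun i =>
      let c := altCoverage m operations i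
      if c > 0 then some (altVariant cs i c) else none)))

-- ===== PRECONDITION & SPEC =====
-- Pre_ restricts the first m operations to the task's natural domain of 1-based ranges with
-- in-bounds endpoints, 1 ≤ l ≤ r+1 and r ≤ n (possibly empty when l = r+1), and m to at most
-- len(operations), beyond which A raises IndexError; outside that domain A raises, or Python's
-- negative-index wraparound makes A read (l, r) as a different interval than B's literal
-- reading — an unspecified corner where either reading is defensible.
def Pre_count_different_strings (n : Int) (m : Int) (s : String) (operations : List (Int × Int)) : Prop :=
  m ≤ (operations.length : Int) ∧
  ∀ op ∈ operations.take m.toNat, 1 ≤ op.1 ∧ op.1 ≤ op.2 + 1 ∧ op.2 ≤ n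
instance (n : Int) (m : Int) (s : String) (operations : List (Int × Int)) : Decidable (Pre_count_different_strings n m s operations) := by unfold Pre_count_different_strings; infer_instance

def pvWitness_count_different_strings : Int × Int × String × (List (Int × Int)) := (3, 1, "abc", [(1, 2)])

def Spec_count_different_strings (n : Int) (m : Int) (s : String) (operations : List (Int × Int)) (out : Int) : Prop := out = count_different_strings_alt n m s operations
instance (n : Int) (m : Int) (s : String) (operations : List (Int × Int)) (out : Int) : Decidable (Spec_count_different_strings n m s operations out) := by unfold Spec_count_different_strings; infer_instance

-- ===== CLAIM (what is proved, stated in full; the proofs are below) =====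
def Claim_equal_count_different_strings : Prop := ∀ (n : Int) (m : Int) (s : String) (operations : List (Int × Int)), Dom_count_different_strings n m s operations → Pre_count_different_strings n m s operations → Spec_count_different_strings n m s operations (count_different_strings n m s operations)

-- ===== LEMMAS AND PROOFS =====

-- the sum of the first k entries after a point update at p changes by the update's delta iff p < k
theorem pv_sum_take_set (l : List Int) (p k : Nat) (a : Int) (hp : p < l.length) :
    ((l.set p a).take k).sum = (l.take k).sum + (if p < k then a - l[p] else 0) := by
  induction l generalizing p k with
  | nil => simp at hp
  | cons x xs ih =>
    cases p with
    | zero =>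
      cases k with
      | zero => simp
      | succ k => simp; ring
    | succ p =>
      cases k with
      | zero => simp
      | succ k =>
        simp only [List.set_cons_succ, List.take_succ_cons, List.sum_cons,
          List.getElem_cons_succ]
        rw [ih p k (by simpa using hp)]
        by_cases h : p < k
        · simp [h]; ring
        · simp [h]

-- read-modify-write form of the previous lemma, matching A's `substrings[p] += d`
theorem pv_sum_take_rmw (l : List Int) (p : Int) (d : Int) (k : Nat)
    (h0 : 0 ≤ p) (h1 : p < (l.length : Int)) :
    ((PySem.List.pySetD l p (PySem.List.pyGetD l p 0 + d)).take k).sum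
      = (l.take k).sum + (if p < (k : Int) then d else 0) := by
  have hplt : p.toNat < l.length := by omega
  rw [PySem.List.pySetD_of_nonneg l _ h0, PySem.List.pyGetD_eq_getElem l 0 h0 h1,
    pv_sum_take_set l p.toNat k _ hplt]
  have hiff : p < (k : Int) ↔ p.toNat < k := by omega
  by_cases h : p.toNat < k
  · simp [h, hiff]
  · simp [h, hiff]

-- the same, in the `x - 1` form A's second update uses
theorem pv_sum_take_rmw_sub (l : List Int) (p : Int) (k : Nat)
    (h0 : 0 ≤ p) (h1 : p < (l.length : Int)) :
    ((PySem.List.pySetD l p (PySem.List.pyGetD l p 0 - 1)).take k).sum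
      = (l.take k).sum + (if p < (k : Int) then -1 else 0) := by
  have h := pv_sum_take_rmw l p (-1) k h0 h1
  rw [← sub_eq_add_neg] at h
  exact h

-- pySetD preserves length, hence so does A's first loop
theorem pv_fold_aStep_length (operations : List (Int × Int)) (is : List Int) (subs : List Int) :
    (is.foldl (aStep operations) subs).length = subs.length := by
  induction is generalizing subs with
  | nil => rfl
  | cons i is ih => simp [List.foldl_cons, ih, aStep, PySem.List.length_pySetD]

-- prefix sums of A's difference array count the valid operations covering [0, k)
theorem pv_diff_sum (n : Int) (ops : List (Int × Int)) (t : Nat)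
    (hlen : (t : Int) ≤ (ops.length : Int))
    (hvalid : ∀ op ∈ ops.take t, 1 ≤ op.1 ∧ op.1 ≤ op.2 + 1 ∧ op.2 ≤ n) (k : Nat) :
    (((PySem.List.pyRange 0 (t : Int) 1).foldl (aStep ops) (List.replicate (n + 1).toNat 0)).take k).sum
      = ((PySem.List.pyRange 0 (t : Int) 1).countP (fun jj =>
          let op := PySem.List.pyGetD ops jj (0, 0)
          decide (op.1 - 1 < (k : Int) ∧ (k : Int) ≤ op.2)) : Int) := by
  induction t with
  | zero =>
    simp [PySem.List.pyRange_one_eq_nil (le_refl (0 : Int)), List.take_replicate]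
  | succ t ih =>
    have hcast : ((t + 1 : Nat) : Int) = (t : Int) + 1 := by push_cast; ring
    rw [hcast, PySem.List.pyRange_one_succ_right (by positivity), List.foldl_append,
      List.countP_append]
    have hops_t : PySem.List.pyGetD ops (t : Int) (0, 0) = ops[t]'(by omega) := by
      rw [PySem.List.pyGetD_eq_getElem ops (0, 0) (by positivity) (by omega)]
      simp
    have hmem : ops[t]'(by omega) ∈ ops.take (t + 1) := by
      have h1 : t < (ops.take (t + 1)).length := by simp; omega
      have h2 : (ops.take (t + 1))[t]'h1 = ops[t]'(by omega) := List.getElem_take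
      exact h2 ▸ List.getElem_mem h1
    obtain ⟨hl1, hlr, hrn⟩ := hvalid _ hmem
    have hn1 : ((n + 1).toNat : Int) = n + 1 := by omega
    have hprevlen : ((PySem.List.pyRange 0 (t : Int) 1).foldl (aStep ops)
        (List.replicate (n + 1).toNat 0)).length = (n + 1).toNat := by
      rw [pv_fold_aStep_length]; simp
    rw [List.foldl_cons, List.foldl_nil]
    simp only [aStep, hops_t]
    rw [pv_sum_take_rmw_sub _ (ops[t]'(by omega)).2 k (by omega)
        (by rw [PySem.List.length_pySetD, hprevlen]; omega),
      pv_sum_take_rmw _ _ 1 k (by omega) (by rw [hprevlen]; omega)]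
    have hsub : ∀ op ∈ ops.take t, op ∈ ops.take (t + 1) := by
      intro op hop
      have he : ops.take t = (ops.take (t + 1)).take t := by
        rw [List.take_take]; congr 1; omega
      exact (List.take_prefix t (ops.take (t + 1))).subset (he ▸ hop)
    rw [ih (by omega) (fun op hop => hvalid op (hsub op hop))]
    simp only [List.countP_cons, List.countP_nil, hops_t, decide_eq_true_eq]
    push_cast
    split_ifs <;> omega

-- A's second loop, run from position a with the correct running prefix sum, collects exactly
-- B's comprehension list, in order
theorem pv_main_loop (n : Int) (subsF : List Int) (cs : List Char) (cov : Int → Int)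
    (hlen : n ≤ (subsF.length : Int))
    (hcov : ∀ i : Int, 0 ≤ i → i < n → (subsF.take (i.toNat + 1)).sum = cov i) :
    ∀ (fuel : Nat) (a : Int), 0 ≤ a → (n - a).toNat = fuel →
    ∀ (st : PySem.Set (List Char)) (cc : Int), cc = (subsF.take a.toNat).sum →
    ((PySem.List.pyRange a n 1).foldl (aMainStep subsF cs) (cc, st)).2
      = ((PySem.List.pyRange a n 1).filterMap (fun i =>
          if cov i > 0 then some (altVariant cs i (cov i)) else none)).foldl PySem.Set.add st := by
  intro fuel
  induction fuel with
  | zero =>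
    intro a ha hfuel st cc hcc
    rw [PySem.List.pyRange_one_eq_nil (by omega)]
    rfl
  | succ fuel ih =>
    intro a ha hfuel st cc hcc
    have han : a < n := by omega
    rw [PySem.List.pyRange_one_cons han, List.foldl_cons, List.filterMap_cons]
    have hlt : a.toNat < subsF.length := by omega
    have hget : PySem.List.pyGetD subsF a 0 = subsF[a.toNat] :=
      PySem.List.pyGetD_eq_getElem subsF 0 ha (by omega)
    have hcc' : cc + PySem.List.pyGetD subsF a 0 = cov a := by
      rw [hget, hcc, ← List.sum_take_succ subsF a.toNat hlt]
      exact hcov a ha han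
    have hnext : cov a = (subsF.take ((a + 1).toNat)).sum := by
      have h1 : (a + 1).toNat = a.toNat + 1 := by omega
      rw [h1, List.sum_take_succ subsF a.toNat hlt, ← hcc', hget, hcc]
    simp only [aMainStep, hcc']
    by_cases hpos : cov a > 0
    · simp only [if_pos hpos]
      rw [ih (a + 1) (by omega) (by omega) _ (cov a) hnext, List.foldl_cons]
      rfl
    · simp only [if_neg hpos]
      exact ih (a + 1) (by omega) (by omega) st (cov a) hnext

-- ===== VERDICT (by name: the statement is the Claim_ definition above) =====
theorem count_different_strings_spec : Claim_equal_count_different_strings := by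
  intro n m s ops hdom hpre
  obtain ⟨hm, hvalid⟩ := hpre
  unfold Spec_count_different_strings count_different_strings count_different_strings_alt
  have hrange : PySem.List.pyRange 0 m 1 = PySem.List.pyRange 0 (m.toNat : Int) 1 := by
    by_cases h : 0 ≤ m
    · rw [Int.toNat_of_nonneg h]
    · rw [PySem.List.pyRange_one_eq_nil (by omega), PySem.List.pyRange_one_eq_nil (by omega)]
  have hsublen : ((PySem.List.pyRange 0 m 1).foldl (aStep ops)
      (List.replicate (n + 1).toNat 0)).length = (n + 1).toNat := by
    rw [pv_fold_aStep_length]; simp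
  have hcov : ∀ i : Int, 0 ≤ i → i < n →
      (((PySem.List.pyRange 0 m 1).foldl (aStep ops)
        (List.replicate (n + 1).toNat 0)).take (i.toNat + 1)).sum = altCoverage m ops i := by
    intro i h0 h1
    rw [hrange, pv_diff_sum n ops m.toNat (by omega) hvalid (i.toNat + 1)]
    unfold altCoverage
    rw [hrange]
    congr 1
    apply List.countP_congr
    intro x _
    simp only [decide_eq_true_eq]
    omega
  have key := pv_main_loop n _ s.toList (altCoverage m ops) (by rw [hsublen]; omega) hcov
      n.toNat 0 (le_refl 0) (by omega) PySem.Set.empty 0 (by simp)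
  simp only []
  rw [key, PySem.Set.ofList_eq_foldl]
  rfl
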